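-- pv_equiv track=rewrite | github.com/kujaku11/mt_metadata | mt_metadata/transfer_functions/io/edi/metadata/header.py | get_header_list
-- ===== SOURCE A (Python) =====
-- def get_header_list(edi_lines: list[str]) -> list[str]:
--     """
--     Get the header information from the .edi file in the form of a list.
--
--     Extracts header lines from an EDI file, returning each key-value pair
--     as a formatted string.
--
--     Parameters
--     ----------
--     edi_lines : list of str
--         List of lines from an EDI file to parse for header information.
--
--     Returns
--     -------
--     list of str
--         List of header key-value pairs in the format 'key=value'.
--
--     Examples
--     --------
--     >>> header = Header()
--     >>> edi_lines = ['>HEAD', 'DATAID=MT001', 'LAT=45.5', '>']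
--     >>> header.get_header_list(edi_lines)
--     ['DATAID=MT001', 'LAT=45.5']
--
--     """
--
--     header_list = []
--     head_find = False
--
--     # read in list line by line and then truncate
--     for line in edi_lines:
--         # check for header label
--         if ">" in line and "head" in line.lower():
--             head_find = True
--         # if the header line has been found then the next >
--         # should be the next section so stop
--         elif ">" in line:
--             if head_find is True:
--                 break
--             else:
--                 pass
--         # get the header information into a list
--         elif head_find:
--             # skip any blank lines
--             if len(line.strip()) > 2:
--                 line = line.strip().replace('"', "")
--                 h_list = line.split("=")
--                 if len(h_list) == 2:
--                     key = h_list[0].strip()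
--                     value = h_list[1].strip()
--                     header_list.append(f"{key}={value}")
--     return header_list
-- ===== SOURCE B (Python) =====
-- def get_header_list(edi_lines: list[str]) -> list[str]:
--     # find the index of the head-labeled line
--     start = None
--     for i, line in enumerate(edi_lines):
--         if ">" in line and "head" in line.lower():
--             start = i
--             break
--     if start is None:
--         return []
--     rest = edi_lines[start + 1:]
--     # the section ends at the first '>' line that is not head-labeled
--     end = len(rest)
--     for j, line in enumerate(rest):
--         if ">" in line and "head" not in line.lower():
--             end = j
--             break
--     section = rest[:end]
--     # parse the section (remaining '>' lines here are head labels: skip them)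
--     header_list = []
--     for line in section:
--         if ">" in line:
--             continue
--         if len(line.strip()) > 2:
--             stripped = line.strip().replace('"', "")
--             h_list = stripped.split("=")
--             if len(h_list) == 2:
--                 header_list.append(f"{h_list[0].strip()}={h_list[1].strip()}")
--     return header_list
-- ===== Notes on version B (the rewrite author's own statement) =====
-- stated objective: alternative
-- what changed: Replaces A's single stateful flag-driven loop with a find-boundaries-then-parse-slice decomposition: locate the head-labeled line, cut the section at the first non-head '>' line, then parse the slice in a separate pass.
import Mathlib
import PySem

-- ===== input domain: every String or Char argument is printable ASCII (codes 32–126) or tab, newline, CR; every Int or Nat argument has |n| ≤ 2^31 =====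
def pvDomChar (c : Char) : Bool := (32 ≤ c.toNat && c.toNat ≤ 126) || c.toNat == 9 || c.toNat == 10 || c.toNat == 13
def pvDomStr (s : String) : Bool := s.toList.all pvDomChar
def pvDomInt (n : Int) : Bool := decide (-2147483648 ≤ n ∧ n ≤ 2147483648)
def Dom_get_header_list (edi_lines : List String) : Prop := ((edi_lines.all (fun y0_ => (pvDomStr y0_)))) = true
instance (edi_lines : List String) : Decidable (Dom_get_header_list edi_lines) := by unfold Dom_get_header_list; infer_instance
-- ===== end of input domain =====

-- B replaces A's single stateful flag-driven loop by a find-boundaries-then-parse-slice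
-- decomposition (objective: alternative, same cost); return value only, no mutation involved.

-- ===== PORT A =====

-- '">" in line' (shared: both Pythons test this)
def pvGt (line : String) : Bool := PySem.Str.isIn ">" line

-- '">" in line and "head" in line.lower()' (shared: both Pythons test this)
def pvHeadLabel (line : String) : Bool :=
  PySem.Str.isIn ">" line && PySem.Str.isIn "head" (PySem.Str.lower line)

-- the per-line parsing both Pythons perform verbatim: skip short lines, strip,
-- drop '"', split on '=', keep exactly-two-part results as "key=value"
def pvParseLine (line : String) : List String :=
  if PySem.Str.len (PySem.Str.strip line) > 2 then
    let line' := PySem.Str.replace (PySem.Str.strip line) "\"" ""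
    match PySem.Str.split? line' "=" with
    | some [k, v] => [PySem.Str.join "" [PySem.Str.strip k, "=", PySem.Str.strip v]]
    | _ => []
  else []

-- A's loop, flag 'head_find' threaded through; the Python 'break' is returning []
def pvGoA (head_find : Bool) : List String → List String
  | [] => []
  | line :: rest =>
    if pvHeadLabel line then pvGoA true rest
    else if pvGt line then (if head_find then [] else pvGoA head_find rest)
    else if head_find then pvParseLine line ++ pvGoA head_find rest
    else pvGoA head_find rest

def get_header_list (edi_lines : List String) : List String := pvGoA false edi_lines

-- ===== PORT B =====
-- find the head-labeled line, slice the section up to the first non-head '>' line,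
-- then parse that slice (skipping its remaining '>' lines, which are head labels)
def get_header_list_alt (edi_lines : List String) : List String :=
  match edi_lines.dropWhile (fun l => !pvHeadLabel l) with
  | [] => []
  | _ :: tail =>
    ((tail.takeWhile (fun l => !(pvGt l && !pvHeadLabel l))).filter
        (fun l => !pvGt l)).flatMap pvParseLine

-- ===== PRECONDITION & SPEC =====
def Spec_get_header_list (edi_lines : List String) (out : List String) : Prop := out = get_header_list_alt edi_lines
instance (edi_lines : List String) (out : List String) : Decidable (Spec_get_header_list edi_lines out) := by unfold Spec_get_header_list; infer_instance

-- ===== CLAIM (what is proved, stated in full; the proofs are below) =====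
def Claim_equal_get_header_list : Prop := ∀ (edi_lines : List String), Dom_get_header_list edi_lines → Spec_get_header_list edi_lines (get_header_list edi_lines)

-- ===== LEMMAS AND PROOFS =====

-- a head-labeled line contains '>'
theorem pvGt_of_headLabel {l : String} (h : pvHeadLabel l = true) : pvGt l = true := by
  unfold pvHeadLabel at h
  exact (Bool.and_eq_true _ _).mp h |>.1

-- inside the section (flag already set) A produces exactly B's parse of the slice
theorem pvGoA_true_eq (ls : List String) :
    pvGoA true ls =
      ((ls.takeWhile (fun l => !(pvGt l && !pvHeadLabel l))).filter
        (fun l => !pvGt l)).flatMap pvParseLine := by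
  induction ls with
  | nil => simp [pvGoA]
  | cons l rest ih =>
    by_cases h1 : pvHeadLabel l = true
    · have hg := pvGt_of_headLabel h1
      simp [pvGoA, List.takeWhile, h1, hg, ih]
    · have h1' : pvHeadLabel l = false := by simpa using h1
      by_cases h2 : pvGt l = true
      · simp [pvGoA, List.takeWhile, h1', h2]
      · have h2' : pvGt l = false := by simpa using h2
        simp [pvGoA, List.takeWhile, h1', h2', ih]

-- before the flag is set A just scans for the head label, like B's dropWhile
theorem pvGoA_false_eq (ls : List String) : pvGoA false ls = get_header_list_alt ls := by
  induction ls with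
  | nil => simp [pvGoA, get_header_list_alt]
  | cons l rest ih =>
    by_cases h1 : pvHeadLabel l = true
    · simp [pvGoA, get_header_list_alt, List.dropWhile, h1, pvGoA_true_eq]
    · have h1' : pvHeadLabel l = false := by simpa using h1
      by_cases h2 : pvGt l = true
      · simpa [pvGoA, get_header_list_alt, List.dropWhile, h1', h2] using ih
      · have h2' : pvGt l = false := by simpa using h2
        simpa [pvGoA, get_header_list_alt, List.dropWhile, h1', h2'] using ih

-- ===== VERDICT (by name: the statement is the Claim_ definition above) =====
theorem get_header_list_spec : Claim_equal_get_header_list := by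
  intro edi_lines _
  unfold Spec_get_header_list get_header_list
  exact pvGoA_false_eq edi_lines
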